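-- pv_equiv track=rewrite | github.com/Prince-linux/classify-numbers | num.py | arrange_nums
-- ===== SOURCE A (Python) =====
-- def arrange_nums(nums, cutoff):
--     """
--     Arranges numbers into two different list comparing them to the cutoff number
--     @param nums the list of number
--     @param cutoff the cutoff number
--     @return list greater than cutoff and list smaller than cutoff
--     """
--     big_nums = []
--     small_nums = []
--     for i in nums:
--         if i > cutoff:
--             i = big_nums.append(i)
--         else:
--             i = small_nums.append(i)
--     return (big_nums, small_nums)
-- ===== SOURCE B (Python) =====
-- def arrange_nums(nums, cutoff):
--     # Divide-and-conquer stable partition: split the list in half, partition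
--     # each half recursively, and concatenate the halves' results in order.
--     def go(l):
--         n = len(l)
--         if n == 0:
--             return ([], [])
--         if n == 1:
--             x = l[0]
--             return ([x], []) if x > cutoff else ([], [x])
--         mid = n // 2
--         b1, s1 = go(l[:mid])
--         b2, s2 = go(l[mid:])
--         return (b1 + b2, s1 + s2)
--     return go(nums)
-- ===== Notes on version B (the rewrite author's own statement) =====
-- stated objective: alternative
-- what changed: Replaces A's single left-to-right branching loop with a divide-and-conquer stable partition: split the list at the midpoint, recursively partition each half, and concatenate the halves' (big, small) results.
import Mathlib
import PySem

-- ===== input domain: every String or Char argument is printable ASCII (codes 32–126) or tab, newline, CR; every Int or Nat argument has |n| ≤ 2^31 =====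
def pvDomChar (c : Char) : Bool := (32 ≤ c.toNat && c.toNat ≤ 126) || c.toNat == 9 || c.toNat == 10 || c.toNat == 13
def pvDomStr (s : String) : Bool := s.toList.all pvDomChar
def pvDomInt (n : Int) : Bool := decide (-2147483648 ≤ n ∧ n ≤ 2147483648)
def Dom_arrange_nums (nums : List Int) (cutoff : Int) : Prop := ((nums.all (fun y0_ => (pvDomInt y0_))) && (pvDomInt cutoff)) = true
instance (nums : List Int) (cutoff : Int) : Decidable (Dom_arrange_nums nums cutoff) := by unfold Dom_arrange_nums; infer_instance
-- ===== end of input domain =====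

-- B replaces A's single branching loop with a divide-and-conquer stable partition (alternative algorithm; return value unchanged).


-- ===== PORT A =====
-- A: one pass, appending each element to big_nums or small_nums
def arrange_nums (nums : List Int) (cutoff : Int) : List Int × List Int :=
  let st := nums.foldl (fun (st : List Int × List Int) i =>
    if i > cutoff then (st.1 ++ [i], st.2) else (st.1, st.2 ++ [i])) ([], [])
  (st.1, st.2)

-- ===== PORT B =====
-- B helper: divide-and-conquer stable partition (Source B's inner 'go')
def arrangeGo (cutoff : Int) (l : List Int) : List Int × List Int :=
  match l with
  | [] => ([], [])
  | [x] => if x > cutoff then ([x], []) else ([], [x])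
  | a :: b :: rest =>
    let n := (a :: b :: rest).length
    let mid := n / 2
    let p1 := arrangeGo cutoff ((a :: b :: rest).take mid)
    let p2 := arrangeGo cutoff ((a :: b :: rest).drop mid)
    (p1.1 ++ p2.1, p1.2 ++ p2.2)
termination_by l.length
decreasing_by
  · simp only [List.length_take, List.length_cons]; omega
  · simp only [List.length_drop, List.length_cons]; omega

def arrange_nums_alt (nums : List Int) (cutoff : Int) : List Int × List Int :=
  arrangeGo cutoff nums

-- ===== PRECONDITION & SPEC =====
def Spec_arrange_nums (nums : List Int) (cutoff : Int) (out : List Int × List Int) : Prop := out = arrange_nums_alt nums cutoff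
instance (nums : List Int) (cutoff : Int) (out : List Int × List Int) : Decidable (Spec_arrange_nums nums cutoff out) := by unfold Spec_arrange_nums; infer_instance

-- ===== CLAIM (what is proved, stated in full; the proofs are below) =====
def Claim_equal_arrange_nums : Prop := ∀ (nums : List Int) (cutoff : Int), Dom_arrange_nums nums cutoff → Spec_arrange_nums nums cutoff (arrange_nums nums cutoff)

-- ===== LEMMAS AND PROOFS =====

lemma arrange_loop (nums : List Int) (cutoff : Int) (b s : List Int) :
    nums.foldl (fun (st : List Int × List Int) i =>
      if i > cutoff then (st.1 ++ [i], st.2) else (st.1, st.2 ++ [i])) (b, s)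
    = (b ++ nums.filter (fun x => x > cutoff), s ++ nums.filter (fun x => !(x > cutoff))) := by
  induction nums generalizing b s with
  | nil => simp
  | cons x xs ih =>
    by_cases h : x > cutoff <;> simp [List.foldl, h, ih, List.filter]

lemma arrangeGo_eq (cutoff : Int) (l : List Int) :
    arrangeGo cutoff l = (l.filter (fun x => x > cutoff), l.filter (fun x => !(x > cutoff))) := by
  fun_induction arrangeGo cutoff l with
  | case1 => simp
  | case2 x h => simp [h, List.filter]
  | case3 x h => simp [h, List.filter]
  | case4 a b rest n mid p1 p2 iht ihd =>
    simp only [p1, p2, iht, ihd]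
    rw [← List.filter_append, ← List.filter_append, List.take_append_drop]

-- ===== VERDICT (by name: the statement is the Claim_ definition above) =====
theorem arrange_nums_spec : Claim_equal_arrange_nums := by
  intro nums cutoff _
  unfold Spec_arrange_nums arrange_nums arrange_nums_alt
  simp [arrange_loop, arrangeGo_eq]
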